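-- pv_equiv track=rewrite | github.com/fossabot/bout_runners | bout_runners/metadata/metadata_reader.py | prune_table_connection
-- ===== SOURCE A (Python) =====
-- def prune_table_connection(table_connection_dict):
--     """
--     Prune a dict containing the table connections.
--
--     Parameters
--     ----------
--     table_connection_dict : dict
--         A dict telling which tables are connected to each other,
--         where the key is the table under consideration and the
--         value is a tuple containing the tables which have a key
--         connection to the table under consideration
--         On the form
--         >>> {'table_1': ('table_2', 'table_3'),
--         ...  'table_2': ('table_1', 'table_3'),
--         ...  'table_3': ('table_1', 'table_2')}
--
--     Returns
--     -------
--     pruned_table_connection_dict : dict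
--         The same as table_connection_dict, but where the
--         connections are represented only once
--         >>> {'table_1': ('table_2', 'table_3'),}
--     """
--     pruned_table_connection_dict = table_connection_dict.copy()
--
--     first_level_tables = table_connection_dict.keys()
--     for first_level_table in first_level_tables:
--         for second_level_table in \
--                 table_connection_dict[first_level_table]:
--             pruned_table_connection_dict.pop(second_level_table,
--                                              None)
--
--     return pruned_table_connection_dict
-- ===== SOURCE B (Python) =====
-- def prune_table_connection(table_connection_dict):
--     referenced = set()
--     for connections in table_connection_dict.values():
--         referenced.update(connections)
--     return {table: connections
--             for table, connections in table_connection_dict.items()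
--             if table not in referenced}
-- ===== Notes on version B (the rewrite author's own statement) =====
-- stated objective: simpler
-- what changed: A copies the dict and destructively pops every referenced table inside a nested loop; B makes one pass collecting a set of all referenced tables and then keeps exactly the keys not in that set with a dict comprehension.
import Mathlib
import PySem

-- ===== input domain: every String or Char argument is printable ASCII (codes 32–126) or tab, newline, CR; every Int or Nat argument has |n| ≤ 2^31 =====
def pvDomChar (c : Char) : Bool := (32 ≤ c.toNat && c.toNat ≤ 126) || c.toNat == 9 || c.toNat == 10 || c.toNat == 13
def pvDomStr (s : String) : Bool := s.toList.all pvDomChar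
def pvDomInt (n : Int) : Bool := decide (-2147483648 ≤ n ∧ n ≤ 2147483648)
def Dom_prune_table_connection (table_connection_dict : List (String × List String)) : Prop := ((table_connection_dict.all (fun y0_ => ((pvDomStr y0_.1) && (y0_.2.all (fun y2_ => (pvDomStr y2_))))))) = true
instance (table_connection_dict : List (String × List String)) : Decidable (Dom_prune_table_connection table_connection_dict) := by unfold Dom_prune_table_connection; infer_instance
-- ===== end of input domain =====

-- B replaces A's copy-then-nested-pop pruning by one pass collecting the set of referenced
-- tables followed by a filter keeping the unreferenced keys (objective: simpler).


-- ===== PORT A =====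
-- pruned_table_connection_dict.pop(second_level_table, None): remove the entry with that
-- key, if any (keys of a Python dict are unique, so at most one entry matches).
def popKey (pruned : List (String × List String)) (k : String) : List (String × List String) :=
  pruned.eraseP (fun kv => kv.1 == k)

-- The outer loop runs over the keys and indexes the dict at each key; since a dict's keys
-- are unique (Pre_), this visits exactly the (key, value) items in order.
def prune_table_connection (table_connection_dict : List (String × List String)) : List (String × List String) :=
  table_connection_dict.foldl
    (fun pruned kv => kv.2.foldl (fun p t => popKey p t) pruned)
    table_connection_dict

-- ===== PORT B =====
def prune_table_connection_alt (table_connection_dict : List (String × List String)) : List (String × List String) :=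
  let referenced : PySem.Set String :=
    table_connection_dict.foldl (fun s kv => PySem.Set.update s kv.2) PySem.Set.empty
  table_connection_dict.filter (fun kv => !(referenced.contains kv.1))

-- ===== PRECONDITION & SPEC =====
-- Pre_ excludes association lists with duplicate keys: those never arise from a Python dict
-- (A's argument type), so A is never even called on them.
def Pre_prune_table_connection (table_connection_dict : List (String × List String)) : Prop :=
  (table_connection_dict.map Prod.fst).Nodup
instance (table_connection_dict : List (String × List String)) : Decidable (Pre_prune_table_connection table_connection_dict) := by unfold Pre_prune_table_connection; infer_instance

def pvWitness_prune_table_connection : (List (String × List String)) :=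
  [("table_1", ["table_2", "table_3"]), ("table_2", ["table_1", "table_3"]), ("table_3", ["table_1", "table_2"])]

def Spec_prune_table_connection (table_connection_dict : List (String × List String)) (out : List (String × List String)) : Prop := out = prune_table_connection_alt table_connection_dict
instance (table_connection_dict : List (String × List String)) (out : List (String × List String)) : Decidable (Spec_prune_table_connection table_connection_dict out) := by unfold Spec_prune_table_connection; infer_instance

-- ===== CLAIM (what is proved, stated in full; the proofs are below) =====
def Claim_equal_prune_table_connection : Prop := ∀ (table_connection_dict : List (String × List String)), Dom_prune_table_connection table_connection_dict → Pre_prune_table_connection table_connection_dict → Spec_prune_table_connection table_connection_dict (prune_table_connection table_connection_dict)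

-- ===== LEMMAS AND PROOFS =====

-- pop on a unique-keys list removes exactly the matching entries (filter form)
lemma popKey_eq_filter (p : List (String × List String)) (k : String)
    (h : (p.map Prod.fst).Nodup) :
    popKey p k = p.filter (fun kv => kv.1 != k) := by
  induction p with
  | nil => rfl
  | cons hd tl ih =>
    simp only [List.map_cons, List.nodup_cons] at h
    by_cases hk : hd.1 = k
    · simp [popKey, hk]
      refine (List.filter_eq_self.2 ?_).symm
      intro kv hkv
      have : kv.1 ∈ tl.map Prod.fst := List.mem_map_of_mem hkv
      simp only [bne_iff_ne, ne_eq]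
      intro he
      exact h.1 (by rw [hk, ← he]; exact this)
    · have hb : (hd.1 == k) = false := by simp [hk]
      have := ih h.2
      simp only [popKey] at this
      simp [popKey, hb, hk, this]

lemma keys_filter_nodup (p : List (String × List String)) (q : String × List String → Bool)
    (h : (p.map Prod.fst).Nodup) : ((p.filter q).map Prod.fst).Nodup :=
  h.sublist (List.Sublist.map Prod.fst (List.filter_sublist (l := p) (p := q)))

-- the inner loop over a list of tables removes exactly the entries whose key occurs in it
lemma foldl_popKey_eq_filter (ts : List String) (p : List (String × List String))
    (h : (p.map Prod.fst).Nodup) :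
    ts.foldl (fun p t => popKey p t) p = p.filter (fun kv => !(ts.contains kv.1)) := by
  induction ts generalizing p with
  | nil => simp
  | cons t ts ih =>
    simp only [List.foldl_cons]
    rw [popKey_eq_filter p t h, ih _ (keys_filter_nodup p _ h), List.filter_filter]
    apply List.filter_congr
    intro kv _
    by_cases hkt : kv.1 = t <;> simp [hkt]

-- the outer loop removes exactly the entries whose key occurs in some connection list
lemma outer_foldl_eq_filter (todo p : List (String × List String))
    (h : (p.map Prod.fst).Nodup) :
    todo.foldl (fun pruned kv => kv.2.foldl (fun p t => popKey p t) pruned) p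
      = p.filter (fun kv => !((todo.flatMap Prod.snd).contains kv.1)) := by
  induction todo generalizing p with
  | nil => simp
  | cons hd tl ih =>
    simp only [List.foldl_cons]
    rw [foldl_popKey_eq_filter hd.2 p h, ih _ (keys_filter_nodup p _ h), List.filter_filter]
    apply List.filter_congr
    intro kv _
    simp only [List.flatMap_cons, List.contains_eq_mem, List.mem_append]
    by_cases h1 : kv.1 ∈ hd.2 <;> by_cases h2 : kv.1 ∈ tl.flatMap Prod.snd <;> simp [h1, h2]

-- B's referenced set holds exactly the tables occurring in some connection list
lemma mem_referenced (d : List (String × List String)) (x : String) :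
    x ∈ d.foldl (fun s kv => PySem.Set.update s kv.2) PySem.Set.empty
      ↔ x ∈ d.flatMap Prod.snd := by
  suffices h : ∀ (s : PySem.Set String),
      x ∈ d.foldl (fun s kv => PySem.Set.update s kv.2) s ↔ x ∈ s ∨ x ∈ d.flatMap Prod.snd by
    simpa [PySem.Set.empty] using h PySem.Set.empty
  induction d with
  | nil => simp
  | cons hd tl ih =>
    intro s
    simp [List.foldl_cons, ih, PySem.Set.mem_update, or_assoc]

-- ===== VERDICT (by name: the statement is the Claim_ definition above) =====
theorem prune_table_connection_spec : Claim_equal_prune_table_connection := by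
  intro d _ hpre
  show prune_table_connection d = prune_table_connection_alt d
  unfold prune_table_connection prune_table_connection_alt
  rw [outer_foldl_eq_filter d d hpre]
  apply List.filter_congr
  intro kv _
  simp only [PySem.Set.contains, List.contains_eq_mem]
  rw [decide_eq_decide.2 (mem_referenced d kv.1)]
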